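-- pv_equiv track=rewrite | github.com/yirenwangEvenium/wordcloud | preprocessing.py | assign_font_size
-- ===== SOURCE A (Python) =====
-- def assign_font_size(propercase_freq, max_size, min_size):
--     label_fs = {}
--     sorted_tuples = [(k, propercase_freq[k]) for k in sorted(propercase_freq, key=propercase_freq.get, reverse=True)]
--     min_count = sorted_tuples[-1][1]
--     max_count = sorted_tuples[0][1]
--
--     for kw, count in sorted_tuples:
--         if (max_count - min_count) == 0:
--             size = int((max_size - min_size) / 2.0 + min_size)
--         else:
--             #size = int(min_size + (max_size - min_size) * (count * 1.0 / (max_count - min_count)) ** 0.8)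
--             size = int((max_size - min_size)/(max_count - min_count)*count + min_size - (max_size - min_size)/(max_count - min_count)*min_count)
--         label_fs[kw] = size
--
--     # return sorted label_fs in decreasing order of font_size
--     return label_fs
-- ===== SOURCE B (Python) =====
-- def assign_font_size(propercase_freq, max_size, min_size):
--     # Distribution/bucketing approach: take min/max of the counts in one pass,
--     # group the keywords by count in a dict, then emit the buckets from the
--     # highest count down (original order inside a bucket), computing each font
--     # size once per distinct count.  No per-item sort.
--     counts = list(propercase_freq.values())
--     max_count = max(counts)
--     min_count = min(counts)
--     if max_count == min_count:
--         size = int((max_size - min_size) / 2.0 + min_size)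
--         return {kw: size for kw in propercase_freq}
--     buckets = {}
--     for kw, count in propercase_freq.items():
--         buckets.setdefault(count, []).append(kw)
--     slope = (max_size - min_size) / (max_count - min_count)
--     sizes = {}
--     for count in sorted(buckets, reverse=True):
--         size = int(slope * count + min_size - slope * min_count)
--         for kw in buckets[count]:
--             sizes[kw] = size
--     return sizes
-- ===== Notes on version B (the rewrite author's own statement) =====
-- stated objective: faster
-- what changed: B never sorts the items: it takes min/max of the counts in one pass, groups keywords by count in a dict, sorts only the distinct counts descending and emits the buckets in that order, computing each font size once per distinct count, whereas A stably sorts all keys by frequency and recomputes the size inside the per-item loop.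
-- outside the precondition, e.g. on assign_font_size({}, 10, 2): A raises IndexError, B raises ValueError
import Mathlib
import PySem

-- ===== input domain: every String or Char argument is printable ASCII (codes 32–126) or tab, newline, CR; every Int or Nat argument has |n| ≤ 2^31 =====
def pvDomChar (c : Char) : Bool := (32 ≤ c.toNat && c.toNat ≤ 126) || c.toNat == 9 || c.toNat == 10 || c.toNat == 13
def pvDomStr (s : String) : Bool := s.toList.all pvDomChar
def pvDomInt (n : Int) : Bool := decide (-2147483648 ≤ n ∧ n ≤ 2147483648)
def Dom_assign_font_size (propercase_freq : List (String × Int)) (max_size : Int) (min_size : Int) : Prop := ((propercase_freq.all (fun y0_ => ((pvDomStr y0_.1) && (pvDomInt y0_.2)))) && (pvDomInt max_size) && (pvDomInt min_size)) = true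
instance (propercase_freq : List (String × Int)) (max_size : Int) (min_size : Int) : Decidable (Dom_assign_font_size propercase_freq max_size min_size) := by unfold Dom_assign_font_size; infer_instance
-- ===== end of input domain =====

-- B replaces A's stable sort of all items by a one-pass min/max of the counts plus a
-- count→keywords bucket dict: only the distinct counts are sorted, the buckets are emitted
-- from the highest count down, and each font size is computed once per distinct count.
-- Python floats are not covered by PySem: both ports use the hand-written exact IEEE-754
-- double model below (pvFl = round-to-nearest-even to 53 significant bits; exact on the |n| ≤ 2^31
-- domain, where int→float conversion is exact and no overflow/subnormal can occur; pvTrunc = int()).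

-- exact binary64 model, shared by both ports (each port applies it to ITS Python's expressions)
def pvPow2 (e : Int) : ℚ :=
  if 0 ≤ e then ((2 ^ e.toNat : ℕ) : ℚ) else 1 / ((2 ^ (-e).toNat : ℕ) : ℚ)

-- round a positive rational to the nearest 53-bit float, ties to even (exact for the normal range)
def pvRoundPos (q : ℚ) : ℚ :=
  let m : ℕ := (q * pvPow2 300).floor.toNat
  let e : Int := (Nat.log2 m : Int) - 300
  let r : ℚ := q * pvPow2 (52 - e)
  let f : Int := r.floor
  let n : Int := if (1:ℚ)/2 < r - (f:ℚ) then f + 1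
    else if r - (f:ℚ) < (1:ℚ)/2 then f
    else if f % 2 = 0 then f else f + 1
  (n : ℚ) * pvPow2 (e - 52)

def pvFl (q : ℚ) : ℚ := if q < 0 then -pvRoundPos (-q) else if q = 0 then 0 else pvRoundPos q
def pvFDiv (a b : ℚ) : ℚ := pvFl (a / b)    -- float '/'
def pvFMul (a b : ℚ) : ℚ := pvFl (a * b)    -- float '*'
def pvFAdd (a b : ℚ) : ℚ := pvFl (a + b)    -- float '+'
def pvFSub (a b : ℚ) : ℚ := pvFl (a - b)    -- float '-'
def pvTrunc (q : ℚ) : Int := q.num.tdiv (q.den : Int)   -- int(x): truncate toward zero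

-- ===== PORT A =====
def assign_font_size (propercase_freq : List (String × Int)) (max_size : Int) (min_size : Int) : List (String × Int) :=
  let label_fs : PySem.Dict String Int := PySem.Dict.empty
  let d : PySem.Dict String Int := PySem.Dict.mk propercase_freq
  -- sorted(propercase_freq, key=propercase_freq.get, reverse=True): iterating a dict yields its
  -- keys; every key is present, so .get k (and propercase_freq[k] below) is the stored value —
  -- ported as getD k 0 (exact: no None / KeyError is reachable)
  let sorted_tuples : List (String × Int) :=
    (PySem.List.sorted d.keys (fun k => d.getD k 0) true).map (fun k => (k, d.getD k 0))
  match PySem.List.pyGet? sorted_tuples (-1), PySem.List.pyGet? sorted_tuples 0 with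
  | some t_last, some t_first =>
      let min_count := t_last.2
      let max_count := t_first.2
      (sorted_tuples.foldl (fun lf kv =>
        let size : Int :=
          if max_count - min_count = 0 then
            pvTrunc (pvFAdd (pvFDiv ((max_size - min_size : Int) : ℚ) 2) ((min_size : Int) : ℚ))
          else
            pvTrunc (pvFSub (pvFAdd (pvFMul (pvFDiv ((max_size - min_size : Int) : ℚ) ((max_count - min_count : Int) : ℚ)) ((kv.2 : Int) : ℚ)) ((min_size : Int) : ℚ)) (pvFMul (pvFDiv ((max_size - min_size : Int) : ℚ) ((max_count - min_count : Int) : ℚ)) ((min_count : Int) : ℚ)))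
        lf.insert kv.1 size) label_fs).items
  | _, _ => []   -- sorted_tuples[-1] raises IndexError on the empty dict: excluded by Pre_

-- ===== PORT B =====
def assign_font_size_alt (propercase_freq : List (String × Int)) (max_size : Int) (min_size : Int) : List (String × Int) :=
  let counts := propercase_freq.map (fun kv => kv.2)
  match PySem.List.max? counts (fun x => x) with
  | none => []   -- max() raises ValueError on the empty dict: excluded by Pre_
  | some max_count =>
  match PySem.List.min? counts (fun x => x) with
  | none => []
  | some min_count =>
    if max_count = min_count then
      let size := pvTrunc (pvFAdd (pvFDiv ((max_size - min_size : Int) : ℚ) 2) ((min_size : Int) : ℚ))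
      -- {kw: size for kw in propercase_freq}: dict comprehension over the (distinct) keys
      ((propercase_freq.foldl (fun d kv => d.insert kv.1 size) (PySem.Dict.empty : PySem.Dict String Int)).items)
    else
      -- buckets.setdefault(count, []).append(kw): ported as modify (append to the entry, default [])
      let buckets : PySem.Dict Int (List String) :=
        propercase_freq.foldl (fun d kv => d.modify kv.2 [] (fun ks => ks ++ [kv.1])) PySem.Dict.empty
      let slope := pvFDiv ((max_size - min_size : Int) : ℚ) ((max_count - min_count : Int) : ℚ)
      -- for count in sorted(buckets, reverse=True): iterating a dict yields its keys
      let cs := PySem.List.sorted buckets.keys (fun x => x) true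
      (cs.foldl (fun d c =>
        let size := pvTrunc (pvFSub (pvFAdd (pvFMul slope ((c : Int) : ℚ)) ((min_size : Int) : ℚ)) (pvFMul slope ((min_count : Int) : ℚ)))
        (buckets.getD c []).foldl (fun d kw => d.insert kw size) d) (PySem.Dict.empty : PySem.Dict String Int)).items

-- ===== PRECONDITION & SPEC =====
-- Pre_ excludes the empty dict, on which A raises IndexError (B ValueError), and association
-- lists with duplicate keys, which do not represent any Python dict (the argument is a dict).
def Pre_assign_font_size (propercase_freq : List (String × Int)) (max_size : Int) (min_size : Int) : Prop :=
  propercase_freq ≠ [] ∧ (propercase_freq.map Prod.fst).Nodup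
instance (propercase_freq : List (String × Int)) (max_size : Int) (min_size : Int) : Decidable (Pre_assign_font_size propercase_freq max_size min_size) := by unfold Pre_assign_font_size; infer_instance

def pvWitness_assign_font_size : (List (String × Int)) × Int × Int := ([("word", 5), ("cloud", 2)], 40, 10)

def Spec_assign_font_size (propercase_freq : List (String × Int)) (max_size : Int) (min_size : Int) (out : List (String × Int)) : Prop := out = assign_font_size_alt propercase_freq max_size min_size
instance (propercase_freq : List (String × Int)) (max_size : Int) (min_size : Int) (out : List (String × Int)) : Decidable (Spec_assign_font_size propercase_freq max_size min_size out) := by unfold Spec_assign_font_size; infer_instance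

-- ===== CLAIM (what is proved, stated in full; the proofs are below) =====
def Claim_equal_assign_font_size : Prop := ∀ (propercase_freq : List (String × Int)) (max_size : Int) (min_size : Int), Dom_assign_font_size propercase_freq max_size min_size → Pre_assign_font_size propercase_freq max_size min_size → Spec_assign_font_size propercase_freq max_size min_size (assign_font_size propercase_freq max_size min_size)

-- ===== LEMMAS AND PROOFS =====

-- insertBy commutes with mapping f when comparisons are lifted through f
theorem pv_insertBy_map {α β : Type} (f : α → β) (bef : β → β → Bool) (x : α) :
    ∀ acc : List α, PySem.List.insertBy bef (f x) (acc.map f)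
      = (PySem.List.insertBy (fun a b => bef (f a) (f b)) x acc).map f := by
  intro acc
  induction acc with
  | nil => simp [PySem.List.insertBy]
  | cons y ys ih =>
      simp only [List.map_cons, PySem.List.insertBy]
      by_cases h : bef (f x) (f y) = true
      · simp [h]
      · simp only [h, if_neg, Bool.not_eq_true] at *
        simp [ih]

theorem pv_foldl_insertBy_map {α β : Type} (f : α → β) (bef : β → β → Bool) :
    ∀ (l acc : List α),
      l.foldl (fun acc kv => PySem.List.insertBy bef (f kv) acc) (acc.map f)
        = (l.foldl (fun acc kv => PySem.List.insertBy (fun a b => bef (f a) (f b)) kv acc) acc).map f := by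
  intro l
  induction l with
  | nil => intro acc; rfl
  | cons x xs ih =>
      intro acc
      simp only [List.foldl_cons]
      rw [pv_insertBy_map f bef x acc, ih]

theorem pv_insertBy_congr {α : Type} (bef bef2 : α → α → Bool) (x : α) :
    ∀ ys : List α, (∀ y ∈ ys, bef x y = bef2 x y) →
      PySem.List.insertBy bef x ys = PySem.List.insertBy bef2 x ys := by
  intro ys
  induction ys with
  | nil => intro _; rfl
  | cons y ys ih =>
      intro h
      simp only [PySem.List.insertBy]
      rw [h y (by simp)]
      by_cases h2 : bef2 x y = true
      · simp [h2]
      · simp only [Bool.not_eq_true] at h2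
        simp only [h2, if_neg, Bool.false_eq_true, not_false_iff]
        rw [ih (fun y hy => h y (by simp [hy]))]

theorem pv_foldl_insertBy_congr {α : Type} (bef bef2 : α → α → Bool) :
    ∀ (l acc : List α), (∀ a ∈ l, ∀ b, (b ∈ acc ∨ b ∈ l) → bef a b = bef2 a b) →
      l.foldl (fun acc x => PySem.List.insertBy bef x acc) acc
        = l.foldl (fun acc x => PySem.List.insertBy bef2 x acc) acc := by
  intro l
  induction l with
  | nil => intro acc _; rfl
  | cons x xs ih =>
      intro acc h
      simp only [List.foldl_cons]
      rw [pv_insertBy_congr bef bef2 x acc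
        (fun y hy => h x (by simp) y (Or.inl hy))]
      exact ih _ (fun a ha b hb => h a (by simp [ha]) b (by
        rcases hb with hb | hb
        · rw [PySem.List.mem_insertBy] at hb
          rcases hb with rfl | hb
          · exact Or.inr (by simp)
          · exact Or.inl hb
        · exact Or.inr (by simp [hb])))

-- value lookup in the dict built from a duplicate-free association list
theorem pv_getD_mk {l : List (String × Int)} (hnd : (l.map Prod.fst).Nodup)
    {kv : String × Int} (hm : kv ∈ l) : (PySem.Dict.mk l).getD kv.1 0 = kv.2 := by
  exact PySem.Dict.getD_of_mem_items (PySem.Dict.mk l) (by exact hm) hnd 0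

-- A's key sort through dict.get equals the item sort by count, descending and stable
theorem pv_sorted_keys_eq {l : List (String × Int)} (hnd : (l.map Prod.fst).Nodup) :
    PySem.List.sorted ((PySem.Dict.mk l).keys) (fun k => (PySem.Dict.mk l).getD k 0) true
      = (PySem.List.sorted l (fun kv => kv.2) true).map Prod.fst := by
  have hkeys : (PySem.Dict.mk l).keys = l.map Prod.fst := rfl
  rw [hkeys, PySem.List.sorted_rev_eq_foldl_insertBy, PySem.List.sorted_rev_eq_foldl_insertBy,
    List.foldl_map]
  have h1 := pv_foldl_insertBy_map (Prod.fst)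
    (fun a b => decide ((PySem.Dict.mk l).getD b 0 < (PySem.Dict.mk l).getD a 0)) l []
  simp only [List.map_nil] at h1
  rw [h1]
  congr 1
  apply pv_foldl_insertBy_congr
  intro a ha b hb
  have hb' : b ∈ l := by
    rcases hb with hb | hb
    · simp at hb
    · exact hb
  rw [pv_getD_mk hnd ha, pv_getD_mk hnd hb']

-- re-pairing the sorted keys with their values gives back the sorted items
theorem pv_sorted_tuples_eq {l : List (String × Int)} (hnd : (l.map Prod.fst).Nodup) :
    ((PySem.List.sorted l (fun kv => kv.2) true).map Prod.fst).map
        (fun k => (k, (PySem.Dict.mk l).getD k 0))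
      = PySem.List.sorted l (fun kv => kv.2) true := by
  rw [List.map_map]
  conv_rhs => rw [← List.map_id (PySem.List.sorted l (fun kv => kv.2) true)]
  apply List.map_congr_left
  intro kv hkv
  have hm : kv ∈ l := (PySem.List.mem_sorted l (fun kv => kv.2) true kv).mp hkv
  simp [Function.comp, pv_getD_mk hnd hm]

theorem pv_pyGet_zero {α : Type} (x : α) (xs : List α) :
    PySem.List.pyGet? (x :: xs) 0 = some x := by
  have := PySem.List.pyGet?_natCast (x :: xs) 0
  simpa using this

theorem pv_pyGet_neg_one {α : Type} (x : α) (xs : List α) :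
    PySem.List.pyGet? (x :: xs) (-1) = some ((x :: xs).getLast (by simp)) := by
  rw [PySem.List.pyGet?_neg_one]
  exact List.getLast?_eq_some_getLast (by simp)

-- the last element of a key-descending list is key-minimal
theorem pv_getLast_min (l : List (String × Int)) (hne : l ≠ [])
    (hp : l.Pairwise (fun a b => b.2 ≤ a.2)) : ∀ y ∈ l, (l.getLast hne).2 ≤ y.2 := by
  intro y hy
  obtain ⟨i, hi, rfl⟩ := List.getElem_of_mem hy
  have hn : l.length - 1 < l.length := by
    cases l with
    | nil => simp at hne
    | cons a t => simp
  rw [List.getLast_eq_getElem]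
  rcases Nat.lt_or_ge i (l.length - 1) with h | h
  · exact (List.pairwise_iff_getElem.mp hp) i (l.length - 1) hi hn h
  · have : i = l.length - 1 := by omega
    subst this; exact le_refl _

-- skip a prefix the new element does not go before
theorem pv_insertBy_append_skip {α : Type} (bef : α → α → Bool) (x : α) :
    ∀ (A B : List α), (∀ y ∈ A, bef x y = false) →
      PySem.List.insertBy bef x (A ++ B) = A ++ PySem.List.insertBy bef x B := by
  intro A
  induction A with
  | nil => intro B _; simp
  | cons a A' ih =>
      intro B h
      simp only [List.cons_append, PySem.List.insertBy, h a (by simp), Bool.false_eq_true,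
        if_false]
      rw [ih B (fun y hy => h y (by simp [hy]))]

-- insert at the front of a list the new element goes before everywhere
theorem pv_insertBy_front {α : Type} (bef : α → α → Bool) (x : α) :
    ∀ (B : List α), (∀ y ∈ B, bef x y = true) →
      PySem.List.insertBy bef x B = x :: B := by
  intro B h
  cases B with
  | nil => rfl
  | cons b B' => simp [PySem.List.insertBy, h b (by simp)]

-- inserting x into the bucket concatenation appends it to its own bucket
theorem pv_insertBy_flatMap (x : String × Int) :
    ∀ (cs : List Int) (F : Int → List (String × Int)),
      cs.Pairwise (fun a b => b < a) → x.2 ∈ cs → (∀ c ∈ cs, ∀ y ∈ F c, y.2 = c) →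
      PySem.List.insertBy (fun a b => decide (b.2 < a.2)) x (cs.flatMap F)
        = cs.flatMap (fun c => F c ++ if x.2 = c then [x] else []) := by
  intro cs
  induction cs with
  | nil => intro F _ hx _; simp at hx
  | cons c cs' ih =>
      intro F hp hx hF
      have hpc : ∀ c' ∈ cs', c' < c := fun c' h => (List.pairwise_cons.mp hp).1 c' h
      rw [List.flatMap_cons, List.flatMap_cons]
      by_cases hxc : x.2 = c
      · have hskip : ∀ y ∈ F c, decide (y.2 < x.2) = false := by
          intro y hy
          rw [hF c (by simp) y hy, hxc]; simp
        rw [pv_insertBy_append_skip _ _ _ _ hskip]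
        have hfront : ∀ y ∈ cs'.flatMap F, decide (y.2 < x.2) = true := by
          intro y hy
          obtain ⟨c', hc', hyc⟩ := List.mem_flatMap.mp hy
          rw [hF c' (by simp [hc']) y hyc, hxc]
          simpa using hpc c' hc'
        rw [pv_insertBy_front _ _ _ hfront, if_pos hxc]
        have hrest : cs'.flatMap (fun c' => F c' ++ if x.2 = c' then [x] else [])
            = cs'.flatMap F := by
          apply List.flatMap_congr
          intro c' hc'
          rw [if_neg (by have := hpc c' hc'; omega)]; simp
        rw [hrest]; simp
      · have hx' : x.2 ∈ cs' := by
          rcases List.mem_cons.mp hx with h | h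
          · exact absurd h hxc
          · exact h
        have hskip : ∀ y ∈ F c, decide (y.2 < x.2) = false := by
          intro y hy
          rw [hF c (by simp) y hy]
          have := hpc _ hx'; simp; omega
        rw [pv_insertBy_append_skip _ _ _ _ hskip, if_neg hxc,
          ih F (List.pairwise_cons.mp hp).2 hx' (fun c' h => hF c' (by simp [h]))]
        simp

-- the stable descending sort IS the bucket concatenation over the distinct counts
theorem pv_sorted_flatMap : ∀ (l : List (String × Int)) (cs : List Int),
    cs.Pairwise (fun a b => b < a) → (∀ kv ∈ l, kv.2 ∈ cs) →
    PySem.List.sorted l (fun kv => kv.2) true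
      = cs.flatMap (fun c => l.filter (fun kv => kv.2 == c)) := by
  intro l
  induction l using List.reverseRecOn with
  | nil =>
      intro cs _ _
      rw [PySem.List.sorted_rev_eq_foldl_insertBy]
      simp
  | append_singleton l x ih =>
      intro cs hp hmem
      rw [PySem.List.sorted_rev_eq_foldl_insertBy, List.foldl_append, List.foldl_cons,
        List.foldl_nil, ← PySem.List.sorted_rev_eq_foldl_insertBy,
        ih cs hp (fun kv h => hmem kv (by simp [h]))]
      rw [pv_insertBy_flatMap x cs _ hp (hmem x (by simp))
        (fun c hc y hy => by simpa using (List.mem_filter.mp hy).2)]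
      apply List.flatMap_congr
      intro c hc
      rw [List.filter_append]
      congr 1
      by_cases h : x.2 = c
      · simp [List.filter, h]
      · have hb : (x.2 == c) = false := by simpa using h
        simp [List.filter, hb, h]


-- emitting the buckets from the highest count down, inserting into a fresh dict,
-- yields exactly the stably-sorted items with their per-count sizes
theorem pv_bucket_emit (l : List (String × Int)) (cs : List Int) (sz : Int → Int)
    (hnd : (l.map Prod.fst).Nodup)
    (hcsp : cs.Pairwise (fun a b => b < a)) (hcsm : ∀ kv ∈ l, kv.2 ∈ cs) :
    (cs.foldl (fun d c => ((l.filter (fun kv => kv.2 == c)).map (fun kv => kv.1)).foldl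
        (fun d kw => d.insert kw (sz c)) d) (PySem.Dict.empty : PySem.Dict String Int)).items
      = (PySem.List.sorted l (fun kv => kv.2) true).map (fun kv => (kv.1, sz kv.2)) := by
  have hinner : ∀ (c : Int) (d : PySem.Dict String Int),
      ((l.filter (fun kv => kv.2 == c)).map (fun kv => kv.1)).foldl
          (fun d kw => d.insert kw (sz c)) d
        = ((l.filter (fun kv => kv.2 == c)).map (fun kv => (kv.1, sz c))).foldl
          (fun d p => d.insert p.1 p.2) d := by
    intro c d
    rw [List.foldl_map, List.foldl_map]
  simp only [hinner]
  rw [← List.foldl_flatMap]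
  have hPfst : ((cs.flatMap (fun c => (l.filter (fun kv => kv.2 == c)).map
        (fun kv => (kv.1, sz c)))).map (fun p => p.1))
      = (PySem.List.sorted l (fun kv => kv.2) true).map (fun kv => kv.1) := by
    rw [List.map_flatMap, pv_sorted_flatMap l cs hcsp hcsm, List.map_flatMap]
    apply List.flatMap_congr
    intro c hc
    simp [List.map_map, Function.comp]
  have hPnd : ((cs.flatMap (fun c => (l.filter (fun kv => kv.2 == c)).map
        (fun kv => (kv.1, sz c)))).map (fun p => p.1)).Nodup := by
    rw [hPfst]
    exact ((PySem.List.sorted_perm l (fun kv => kv.2) true).map (fun kv => kv.1)).nodup_iff.mpr hnd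
  have hit := PySem.Dict.items_foldl_insert_fresh
      (cs.flatMap (fun c => (l.filter (fun kv => kv.2 == c)).map (fun kv => (kv.1, sz c))))
      (fun p => p.1) (fun p => p.2) PySem.Dict.empty
      (fun a _ => PySem.Dict.contains_empty a.1) hPnd
  simp only [] at hit
  rw [hit]
  show List.map _ _ = _
  rw [pv_sorted_flatMap l cs hcsp hcsm, List.map_flatMap, List.map_flatMap]
  apply List.flatMap_congr
  intro c hc
  rw [List.map_map]
  apply List.map_congr_left
  intro kv hkv
  have hc2 : kv.2 = c := by simpa using (List.mem_filter.mp hkv).2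
  simp [Function.comp, hc2]

-- ===== VERDICT (by name: the statement is the Claim_ definition above) =====
theorem assign_font_size_spec : Claim_equal_assign_font_size := by
  intro l max_size min_size _hdom hpre
  obtain ⟨hne, hnd⟩ := hpre
  unfold Spec_assign_font_size assign_font_size assign_font_size_alt
  have hst : (PySem.List.sorted ((PySem.Dict.mk l).keys) (fun k => (PySem.Dict.mk l).getD k 0) true).map
      (fun k => (k, (PySem.Dict.mk l).getD k 0)) = PySem.List.sorted l (fun kv => kv.2) true := by
    rw [pv_sorted_keys_eq hnd, pv_sorted_tuples_eq hnd]
  have hSne : PySem.List.sorted l (fun kv => kv.2) true ≠ [] := by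
    intro h; exact hne ((PySem.List.sorted_eq_nil_iff l _ true).mp h)
  obtain ⟨s0, S', hcons⟩ := List.exists_cons_of_ne_nil hSne
  -- max(counts) / min(counts) are defined on the nonempty list
  have hcne : l.map (fun kv => kv.2) ≠ [] := by simpa using hne
  obtain ⟨mB, hmB⟩ : ∃ m, PySem.List.max? (l.map (fun kv => kv.2)) (fun x => x) = some m := by
    cases h : PySem.List.max? (l.map (fun kv => kv.2)) (fun x => x) with
    | none => exact absurd (((PySem.List.max?_eq_none_iff _ _).mp h)) hcne
    | some m => exact ⟨m, rfl⟩
  obtain ⟨mnB, hmnB⟩ : ∃ m, PySem.List.min? (l.map (fun kv => kv.2)) (fun x => x) = some m := by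
    cases h : PySem.List.min? (l.map (fun kv => kv.2)) (fun x => x) with
    | none => exact absurd (((PySem.List.min?_eq_none_iff _ _).mp h)) hcne
    | some m => exact ⟨m, rfl⟩
  -- the head of the descending sort is the max, its last element the min
  have hs0max : ∀ y ∈ l, y.2 ≤ s0.2 := fun y hy => PySem.List.key_head_sorted_rev_ge l (fun kv => kv.2) hcons y hy
  have hs0l : s0 ∈ l := (PySem.List.mem_sorted l (fun kv => kv.2) true s0).mp (by rw [hcons]; simp)
  have hLstl : (s0 :: S').getLast (by simp) ∈ l := by
    refine (PySem.List.mem_sorted l (fun kv => kv.2) true _).mp ?_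
    rw [hcons]; exact List.getLast_mem _
  have hLstmin : ∀ y ∈ l, ((s0 :: S').getLast (by simp)).2 ≤ y.2 := by
    intro y hy
    refine pv_getLast_min (s0 :: S') (by simp) ?_ y ?_
    · rw [← hcons]; exact PySem.List.sorted_pairwise_rev l _
    · rw [← hcons]; exact (PySem.List.mem_sorted l (fun kv => kv.2) true y).mpr hy
  have hmBs0 : mB = s0.2 := by
    refine le_antisymm ?_ ?_
    · obtain ⟨kv, hkv, hkv2⟩ := List.mem_map.mp (PySem.List.max?_mem hmB)
      rw [← hkv2]; exact hs0max kv hkv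
    · exact PySem.List.max?_isMax hmB s0.2 (List.mem_map_of_mem hs0l)
  have hmnBLst : mnB = ((s0 :: S').getLast (by simp)).2 := by
    refine le_antisymm ?_ ?_
    · exact PySem.List.min?_isMin hmnB _ (List.mem_map_of_mem hLstl)
    · obtain ⟨kv, hkv, hkv2⟩ := List.mem_map.mp (PySem.List.min?_mem hmnB)
      rw [← hkv2]; exact hLstmin kv hkv
  -- A's loop over the sorted, duplicate-free keys appends item by item
  have hSnd : ((s0 :: S').map Prod.fst).Nodup := by
    have hperm : ((s0 :: S').map Prod.fst).Perm (l.map Prod.fst) := by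
      rw [← hcons]; exact (PySem.List.sorted_perm l _ true).map Prod.fst
    exact hperm.nodup_iff.mpr hnd
  have hfold : ∀ (g : (String × Int) → Int),
      ((s0 :: S').foldl (fun lf kv => lf.insert kv.1 (g kv)) PySem.Dict.empty).items
        = (s0 :: S').map (fun kv => (kv.1, g kv)) := by
    intro g
    have := PySem.Dict.items_foldl_insert_fresh (s0 :: S') (fun kv => kv.1) (fun kv => g kv)
      PySem.Dict.empty (fun a _ => PySem.Dict.contains_empty a.1) hSnd
    simpa using this
  have hfoldB : ∀ (g : (String × Int) → Int),
      (l.foldl (fun lf kv => lf.insert kv.1 (g kv)) PySem.Dict.empty).items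
        = l.map (fun kv => (kv.1, g kv)) := by
    intro g
    have := PySem.Dict.items_foldl_insert_fresh l (fun kv => kv.1) (fun kv => g kv)
      PySem.Dict.empty (fun a _ => PySem.Dict.contains_empty a.1) hnd
    simpa using this
  simp only [hst, hcons, pv_pyGet_zero, pv_pyGet_neg_one, hmB, hmnB, hmBs0, hmnBLst]
  by_cases hz : s0.2 - ((s0 :: S').getLast (by simp)).2 = 0
  · -- all counts equal: the sort is the identity and both sides map a constant size
    rw [hfold]
    have hz2 : s0.2 = ((s0 :: S').getLast (by simp)).2 := by omega
    simp only [if_pos hz, if_pos hz2, hfoldB]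
    have hall : ∀ y ∈ l, y.2 = s0.2 := by
      intro y hy
      have h1 := hs0max y hy
      have h2 := hLstmin y hy
      omega
    have hself : PySem.List.sorted l (fun kv => kv.2) true = l := by
      refine PySem.List.sorted_rev_eq_self_of_pairwise l _ ?_
      refine List.pairwise_iff_getElem.mpr ?_
      intro i j hi hj hij
      rw [hall _ (List.getElem_mem hi), hall _ (List.getElem_mem hj)]
    rw [← hself, hcons]
  · rw [hfold]
    have hz2 : ¬ s0.2 = ((s0 :: S').getLast (by simp)).2 := fun h => hz (by omega)
    simp only [if_neg hz, if_neg hz2]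
    have hkeys : (l.foldl (fun d kv => d.modify kv.2 [] fun ks => ks ++ [kv.1]) PySem.Dict.empty).keys
        = PySem.Set.ofList (l.map (fun kv => kv.2)) := by
      have h := PySem.Dict.keys_foldl_modify_key l (fun kv => kv.2) [] (fun _ kv => fun ks => ks ++ [kv.1]) PySem.Dict.empty
      simpa [PySem.Set.update_nil_left] using h
    have hbk : ∀ c : Int, (l.foldl (fun d kv => d.modify kv.2 [] fun ks => ks ++ [kv.1]) PySem.Dict.empty).getD c []
        = (l.filter (fun kv => kv.2 == c)).map (fun kv => kv.1) := by
      intro c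
      have h := PySem.Dict.getD_foldl_modify_append (l.map (fun kv => (kv.2, kv.1))) PySem.Dict.empty c
      rw [List.foldl_map] at h
      simpa [List.filter_map, Function.comp, List.map_map] using h
    have hcsnd : (PySem.List.sorted (PySem.Set.ofList (l.map (fun kv => kv.2))) (fun x => x) true).Nodup :=
      (PySem.List.sorted_perm _ (fun x => x) true).nodup_iff.mpr (PySem.Set.nodup_ofList _)
    have hcsp : (PySem.List.sorted (PySem.Set.ofList (l.map (fun kv => kv.2))) (fun x => x) true).Pairwise
        (fun a b => b < a) := by
      have h1 := PySem.List.sorted_pairwise_rev (PySem.Set.ofList (l.map (fun kv => kv.2))) (fun x => x)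
      exact (h1.and hcsnd).imp (fun h => lt_of_le_of_ne h.1 (Ne.symm h.2))
    have hcsm : ∀ kv ∈ l, kv.2 ∈ PySem.List.sorted (PySem.Set.ofList (l.map (fun kv => kv.2))) (fun x => x) true := by
      intro kv h
      refine (PySem.List.mem_sorted _ (fun x => x) true _).mpr ?_
      refine (PySem.Set.mem_ofList _ _).mpr ?_
      exact List.mem_map_of_mem h
    rw [hkeys]
    simp only [hbk]
    rw [pv_bucket_emit l _ _ hnd hcsp hcsm, hcons]
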